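-- pv_equiv track=rewrite | github.com/zx576/Crossin-practices | python_weekly_question/jiugongge/oddN.py | oddN
-- ===== SOURCE A (Python) =====
-- def oddN(n):
--     # 构造二维列表
--     lst = [[0 for i in range(n)] for i in range(n)]
--     # 初始化列表位置
--     x,y = 0,n//2
--     for num in range(1,n*n+1):
--         lst[x][y] = num
--         xa,ya = x-1,y+1
--         # 回绕情况
--         if xa < 0:
--             xa = n-1
--         if ya > n-1:
--             ya = 0
--         # 占位情况
--         if lst[xa][ya] != 0:
--             x = x + 1
--             if x > n-1:
--                 x = 0
--         else:
--             x,y = xa,ya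
--     return lst
-- ===== SOURCE B (Python) =====
-- def oddN(n):
--     # Closed-form placement: no cursor simulation, no occupancy reads.
--     lst = [[0 for i in range(n)] for i in range(n)]
--     for num in range(1, n*n+1):
--         num0 = num - 1
--         q, r = num0 // n, num0 % n
--         lst[(2*q - r) % n][(n//2 - q + r) % n] = num
--     return lst
-- ===== Notes on version B (the rewrite author's own statement) =====
-- stated objective: alternative
-- what changed: Replaces the Siamese-method cursor simulation (moving position with wraparound and grid-occupancy collision checks) by a direct closed-form index formula placing each num at ((2q-r)%n, (n//2-q+r)%n) where q,r = divmod(num-1, n); the grid is never read.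
import Mathlib
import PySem

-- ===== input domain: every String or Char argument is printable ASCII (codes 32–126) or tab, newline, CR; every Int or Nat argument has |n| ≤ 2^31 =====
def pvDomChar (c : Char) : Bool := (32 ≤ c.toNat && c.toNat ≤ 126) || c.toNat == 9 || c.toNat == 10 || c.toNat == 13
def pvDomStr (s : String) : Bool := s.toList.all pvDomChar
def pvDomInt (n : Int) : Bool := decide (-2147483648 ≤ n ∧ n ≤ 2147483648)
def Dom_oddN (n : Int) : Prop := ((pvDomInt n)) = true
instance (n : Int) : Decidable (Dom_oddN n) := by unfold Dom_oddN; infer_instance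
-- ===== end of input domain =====

-- B replaces A's Siamese-method moving-cursor simulation with its occupancy tests
-- by a closed-form placement formula; the grid is never read by B.

-- Shared helpers for the Python grid idioms (exact for the in-range non-negative
-- indices that both programs use on every input admitted by Pre_oddN):
-- 'lst[i][j] = v'
def pySetCell (g : List (List Int)) (i j : Int) (v : Int) : List (List Int) :=
  g.set i.toNat ((g.getD i.toNat []).set j.toNat v)
-- 'lst[i][j]'
def pyGetCell (g : List (List Int)) (i j : Int) : Int :=
  (g.getD i.toNat []).getD j.toNat 0
-- '[[0 for i in range(n)] for i in range(n)]' (n ≥ 0 under Pre_oddN)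
def zeroGrid (N : Nat) : List (List Int) :=
  (List.range N).map (fun _ => (List.range N).map (fun _ => (0:Int)))

-- ===== PORT A =====
-- body of A's for-loop, state (lst, x, y)
def stepA (n : Int) (s : List (List Int) × Int × Int) (num : Int) :
    List (List Int) × Int × Int :=
  let lst := pySetCell s.1 s.2.1 s.2.2 num
  let xa := s.2.1 - 1
  let ya := s.2.2 + 1
  let xa := if xa < 0 then n - 1 else xa
  let ya := if ya > n - 1 then 0 else ya
  if pyGetCell lst xa ya ≠ 0 then
    let x := s.2.1 + 1
    (lst, (if x > n - 1 then 0 else x), s.2.2)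
  else
    (lst, xa, ya)

def oddN (n : Int) : List (List Int) :=
  ((PySem.List.pyRange 1 (n*n+1) 1).foldl (stepA n)
    (zeroGrid n.toNat, 0, PySem.Int.floordiv n 2)).1

-- ===== PORT B =====
-- body of B's for-loop: closed-form placement of num
def stepB (n : Int) (g : List (List Int)) (num : Int) : List (List Int) :=
  let num0 := num - 1
  let q := PySem.Int.floordiv num0 n
  let r := PySem.Int.mod num0 n
  pySetCell g (PySem.Int.mod (2*q - r) n)
    (PySem.Int.mod (PySem.Int.floordiv n 2 - q + r) n) num

def oddN_alt (n : Int) : List (List Int) :=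
  (PySem.List.pyRange 1 (n*n+1) 1).foldl (stepB n) (zeroGrid n.toNat)

-- ===== PRECONDITION & SPEC =====
-- For negative n the Python A builds an empty grid and then raises IndexError on the
-- first assignment; B raises there too.  Pre_ admits exactly the n on which A returns.
def Pre_oddN (n : Int) : Prop := 0 ≤ n
instance (n : Int) : Decidable (Pre_oddN n) := by unfold Pre_oddN; infer_instance
def pvWitness_oddN : Int := 5

def Spec_oddN (n : Int) (out : List (List Int)) : Prop := out = oddN_alt n
instance (n : Int) (out : List (List Int)) : Decidable (Spec_oddN n out) := by unfold Spec_oddN; infer_instance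

-- ===== CLAIM (what is proved, stated in full; the proofs are below) =====
def Claim_equal_oddN : Prop := ∀ (n : Int), Dom_oddN n → Pre_oddN n → Spec_oddN n (oddN n)

-- ===== LEMMAS AND PROOFS =====

-- grid shape invariant
def goodGrid (N : Nat) (g : List (List Int)) : Prop :=
  g.length = N ∧ ∀ row ∈ g, row.length = N

-- B's grid after the first k placements
def Bgrid (n : Int) (k : Nat) : List (List Int) :=
  (PySem.List.pyRange 1 ((k:Int)+1) 1).foldl (stepB n) (zeroGrid n.toNat)

-- A's full state after the first k steps
def Afold (n : Int) (k : Nat) : List (List Int) × Int × Int :=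
  (PySem.List.pyRange 1 ((k:Int)+1) 1).foldl (stepA n)
    (zeroGrid n.toNat, 0, PySem.Int.floordiv n 2)

-- where B places num m (ediv/emod form; = Python's // and % since n > 0)
def posR (n m : Int) : Int := (2 * ((m-1)/n) - ((m-1)%n)) % n
def posC (n m : Int) : Int := (n/2 - ((m-1)/n) + ((m-1)%n)) % n

-- closed form of the cell contents after the first k placements
def cellVal (n k i j : Int) : Int :=
  let q0 := (i + j - n/2) % n
  let r0 := (i + 2*j - 2*(n/2)) % n
  if q0*n + r0 + 1 ≤ k then q0*n + r0 + 1 else 0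

lemma goodGrid_zero (N : Nat) : goodGrid N (zeroGrid N) := by
  constructor
  · simp [zeroGrid]
  · intro row hrow
    simp only [zeroGrid, List.mem_map, List.mem_range] at hrow
    obtain ⟨_, _, rfl⟩ := hrow
    simp

lemma goodGrid_set (N : Nat) (g : List (List Int)) (hg : goodGrid N g) (i j v : Int)
    (hi : 0 ≤ i) (hiN : i < (N:Int)) :
    goodGrid N (pySetCell g i j v) := by
  obtain ⟨h1, h2⟩ := hg
  have hilt : i.toNat < g.length := by omega
  constructor
  · simp [pySetCell, h1]
  · intro row hrow
    rcases List.mem_or_eq_of_mem_set hrow with h | rfl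
    · exact h2 _ h
    · rw [List.length_set, List.getD_eq_getElem _ _ hilt]
      exact h2 _ (List.getElem_mem hilt)

lemma pyGetCell_zero (N : Nat) (i j : Int) : pyGetCell (zeroGrid N) i j = 0 := by
  simp only [pyGetCell, zeroGrid, List.map_const', List.length_range,
    List.getD_eq_getElem?_getD, List.getElem?_replicate]
  split_ifs <;> simp

lemma pyGetCell_pySetCell (N : Nat) (g : List (List Int)) (hg : goodGrid N g)
    (i j i' j' v : Int) (hi : 0 ≤ i) (hiN : i < (N:Int)) (hj : 0 ≤ j) (hjN : j < (N:Int))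
    (hi' : 0 ≤ i') (hiN' : i' < (N:Int)) (hj' : 0 ≤ j') (hjN' : j' < (N:Int)) :
    pyGetCell (pySetCell g i j v) i' j' =
      if i' = i ∧ j' = j then v else pyGetCell g i' j' := by
  obtain ⟨h1, h2⟩ := hg
  have hilt : i.toNat < g.length := by omega
  have hilt' : i'.toNat < g.length := by omega
  have hrowlen : (g.getD i.toNat []).length = N := by
    rw [List.getD_eq_getElem _ _ hilt]; exact h2 _ (List.getElem_mem hilt)
  have houter : (pySetCell g i j v).getD i'.toNat [] =
      if i'.toNat = i.toNat then (g.getD i.toNat []).set j.toNat v else g.getD i'.toNat [] := by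
    unfold pySetCell
    rw [List.getD_eq_getElem _ _ (by rw [List.length_set]; exact hilt')]
    by_cases hii : i'.toNat = i.toNat
    · rw [if_pos hii]; simp [hii, hilt]
    · rw [if_neg hii, List.getElem_set_ne (fun h => hii h.symm),
          List.getD_eq_getElem _ _ hilt']
  unfold pyGetCell
  rw [houter]
  by_cases hii : i' = i
  · subst hii
    rw [if_pos (by omega)]
    by_cases hjj : j' = j
    · subst hjj
      rw [if_pos ⟨rfl, rfl⟩, List.getD_eq_getElem _ _ (by rw [List.length_set]; omega),
          List.getElem_set_self _]
    · rw [if_neg (by tauto), List.getD_eq_getElem?_getD,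
          List.getElem?_set_ne (by omega), ← List.getD_eq_getElem?_getD]
  · rw [if_neg (by omega), if_neg (by tauto)]

lemma Bgrid_succ (n : Int) (k : Nat) :
    Bgrid n (k+1) = stepB n (Bgrid n k) ((k:Int)+1) := by
  unfold Bgrid
  have hcast : (((k+1:Nat)):Int) + 1 = ((k:Int)+1) + 1 := by push_cast; ring
  rw [hcast, PySem.List.pyRange_one_succ_right (by omega), List.foldl_append]
  rfl

lemma Afold_succ (n : Int) (k : Nat) :
    Afold n (k+1) = stepA n (Afold n k) ((k:Int)+1) := by
  unfold Afold
  have hcast : (((k+1:Nat)):Int) + 1 = ((k:Int)+1) + 1 := by push_cast; ring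
  rw [hcast, PySem.List.pyRange_one_succ_right (by omega), List.foldl_append]
  rfl

lemma modeq_lift (n x y c d e : Int) :
    (c*(x%n) + d*(y%n) + e) % n = (c*x + d*y + e) % n := by
  conv_lhs => rw [Int.add_emod, Int.add_emod (c*(x%n)), Int.mul_emod c, Int.mul_emod d,
    Int.emod_emod_of_dvd _ dvd_rfl, Int.emod_emod_of_dvd _ dvd_rfl]
  conv_rhs => rw [Int.add_emod, Int.add_emod (c*x), Int.mul_emod c, Int.mul_emod d]

lemma ediv_emod_eq (n q r : Int) (hn : 0 < n) (hr : 0 ≤ r) (hrn : r < n) :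
    (q*n + r)/n = q ∧ (q*n + r)%n = r := by
  constructor
  · rw [add_comm, Int.add_mul_ediv_right _ _ (by omega : n ≠ 0),
      Int.ediv_eq_zero_of_lt hr hrn, zero_add]
  · simp [Int.emod_eq_of_lt hr hrn]

lemma wrap_down (n x : Int) (hn : 0 < n) (h0 : 0 ≤ x) (hx : x < n) :
    (if x - 1 < 0 then n - 1 else x - 1) = (x - 1) % n := by
  by_cases h : x - 1 < 0
  · have hx0 : x = 0 := by omega
    subst hx0
    rw [if_pos h]
    have h2 : ((0:Int) - 1) % n = (n - 1) % n := by
      conv_lhs => rw [show (0:Int) - 1 = (n-1) + n*(-1) by ring, Int.add_mul_emod_self_left]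
    rw [h2, Int.emod_eq_of_lt (by omega) (by omega)]
  · rw [if_neg h, Int.emod_eq_of_lt (by omega) (by omega)]

lemma wrap_up (n x : Int) (_hn : 0 < n) (h0 : 0 ≤ x) (hx : x < n) :
    (if x + 1 > n - 1 then 0 else x + 1) = (x + 1) % n := by
  by_cases h : x + 1 > n - 1
  · have hx0 : x = n - 1 := by omega
    subst hx0
    rw [if_pos h, sub_add_cancel, Int.emod_self]
  · rw [if_neg h, Int.emod_eq_of_lt (by omega) (by omega)]

lemma lift2 (n x y c d e t : Int) (h : c*x + d*y + e = t) (h0 : 0 ≤ t) (htn : t < n) :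
    (c*(x%n) + d*(y%n) + e) % n = t := by
  rw [modeq_lift, h, Int.emod_eq_of_lt h0 htn]

lemma lift2' (n x y c d e t : Int) (h : c*x + d*y + e = t) :
    (c*(x%n) + d*(y%n) + e) % n = t % n := by
  rw [modeq_lift, h]

lemma Bgrid_zero (n : Int) : Bgrid n 0 = zeroGrid n.toNat := by
  unfold Bgrid
  rw [show (((0:Nat)):Int) + 1 = 1 by norm_num,
    show PySem.List.pyRange 1 1 1 = [] from by decide]
  rfl

lemma Bgrid_succ' (n : Int) (hn : 0 < n) (k : Nat) :
    Bgrid n (k+1) = pySetCell (Bgrid n k) (posR n ((k:Int)+1)) (posC n ((k:Int)+1)) ((k:Int)+1) := by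
  rw [Bgrid_succ]
  simp only [stepB, posR, posC, PySem.Int.floordiv_eq_ediv_of_pos hn,
    PySem.Int.mod_eq_emod_of_pos hn,
    PySem.Int.floordiv_eq_ediv_of_pos (show (0:Int) < 2 by norm_num), add_sub_cancel_right]

-- cell contents of B's grid: closed form (induction on the number of placements)
lemma Bgrid_cell (n : Int) (hn : 0 < n) : ∀ k : Nat, (k:Int) ≤ n*n →
    goodGrid n.toNat (Bgrid n k) ∧
    (∀ i j : Int, 0 ≤ i → i < n → 0 ≤ j → j < n →
      pyGetCell (Bgrid n k) i j = cellVal n (k:Int) i j) := by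
  have hne : n ≠ 0 := by omega
  intro k
  induction k with
  | zero =>
    intro _
    rw [Bgrid_zero]
    refine ⟨goodGrid_zero _, fun i j hi hin hj hjn => ?_⟩
    rw [pyGetCell_zero]
    simp only [cellVal, Nat.cast_zero]
    rw [if_neg]
    have h1 : 0 ≤ (i + j - n/2) % n := Int.emod_nonneg _ hne
    have h2 : 0 ≤ (i + 2*j - 2*(n/2)) % n := Int.emod_nonneg _ hne
    nlinarith
  | succ k ih =>
    intro hk1
    push_cast at hk1
    have hk : (k:Int) ≤ n*n := by omega
    obtain ⟨hgood, hcell⟩ := ih hk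
    have hNn : ((n.toNat : Nat) : Int) = n := Int.toNat_of_nonneg hn.le
    have hq0 : 0 ≤ (k:Int)/n := Int.ediv_nonneg (by positivity) hn.le
    have hqn : (k:Int)/n < n := by rw [Int.ediv_lt_iff_lt_mul hn]; linarith
    have hr0 : 0 ≤ (k:Int)%n := Int.emod_nonneg _ hne
    have hrn : (k:Int)%n < n := Int.emod_lt_of_pos _ hn
    have hkqr : n*((k:Int)/n) + (k:Int)%n = (k:Int) := Int.mul_ediv_add_emod _ n
    set q := (k:Int)/n with hqdef
    set r := (k:Int)%n with hrdef
    have hposR : posR n ((k:Int)+1) = (2*q - r) % n := by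
      simp only [posR, add_sub_cancel_right, hqdef, hrdef]
    have hposC : posC n ((k:Int)+1) = (n/2 - q + r) % n := by
      simp only [posC, add_sub_cancel_right, hqdef, hrdef]
    have hRb : 0 ≤ posR n ((k:Int)+1) ∧ posR n ((k:Int)+1) < n := by
      rw [hposR]; exact ⟨Int.emod_nonneg _ hne, Int.emod_lt_of_pos _ hn⟩
    have hCb : 0 ≤ posC n ((k:Int)+1) ∧ posC n ((k:Int)+1) < n := by
      rw [hposC]; exact ⟨Int.emod_nonneg _ hne, Int.emod_lt_of_pos _ hn⟩
    rw [Bgrid_succ' n hn]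
    refine ⟨goodGrid_set _ _ hgood _ _ _ hRb.1 (by rw [hNn]; exact hRb.2), ?_⟩
    intro i j hi hin hj hjn
    rw [pyGetCell_pySetCell n.toNat _ hgood _ _ _ _ _ hRb.1 (by omega) hCb.1 (by omega)
      hi (by omega) hj (by omega)]
    by_cases hij : i = posR n ((k:Int)+1) ∧ j = posC n ((k:Int)+1)
    · obtain ⟨hieq, hjeq⟩ := hij
      rw [if_pos ⟨hieq, hjeq⟩]
      have hq0eq : (i + j - n/2) % n = q := by
        rw [hieq, hjeq, hposR, hposC,
          show (2*q - r)%n + (n/2 - q + r)%n - n/2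
             = 1*((2*q - r)%n) + 1*((n/2 - q + r)%n) + (-(n/2)) by ring]
        exact lift2 n _ _ _ _ _ _ (by ring) hq0 hqn
      have hr0eq : (i + 2*j - 2*(n/2)) % n = r := by
        rw [hieq, hjeq, hposR, hposC,
          show (2*q - r)%n + 2*((n/2 - q + r)%n) - 2*(n/2)
             = 1*((2*q - r)%n) + 2*((n/2 - q + r)%n) + (-(2*(n/2))) by ring]
        exact lift2 n _ _ _ _ _ _ (by ring) hr0 hrn
      simp only [cellVal, hq0eq, hr0eq]
      push_cast
      rw [if_pos (by linarith [hkqr, mul_comm q n])]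
      linarith [hkqr, mul_comm q n]
    · rw [if_neg hij, hcell i j hi hin hj hjn]
      simp only [cellVal]
      push_cast
      have hQ0 : 0 ≤ (i + j - n/2) % n := Int.emod_nonneg _ hne
      have hQn : (i + j - n/2) % n < n := Int.emod_lt_of_pos _ hn
      have hR0 : 0 ≤ (i + 2*j - 2*(n/2)) % n := Int.emod_nonneg _ hne
      have hRn : (i + 2*j - 2*(n/2)) % n < n := Int.emod_lt_of_pos _ hn
      set q0 := (i + j - n/2) % n with hq0def
      set r0 := (i + 2*j - 2*(n/2)) % n with hr0def
      have hneq : q0*n + r0 + 1 ≠ (k:Int)+1 := by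
        intro he
        have hsum : q0*n + r0 = (k:Int) := by linarith
        have hdm := ediv_emod_eq n q0 r0 hn hR0 hRn
        have hqq : q0 = q := by rw [hqdef, ← hsum, hdm.1]
        have hrr : r0 = r := by rw [hrdef, ← hsum, hdm.2]
        have hieq : (2*q0 - r0) % n = i := by
          rw [hq0def, hr0def,
            show 2*((i + j - n/2)%n) - ((i + 2*j - 2*(n/2))%n)
               = 2*((i + j - n/2)%n) + (-1)*((i + 2*j - 2*(n/2))%n) + 0 by ring]
          exact lift2 n _ _ _ _ _ _ (by ring) hi hin
        have hjeq : (n/2 - q0 + r0) % n = j := by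
          rw [hq0def, hr0def,
            show n/2 - ((i + j - n/2)%n) + ((i + 2*j - 2*(n/2))%n)
               = (-1)*((i + j - n/2)%n) + 1*((i + 2*j - 2*(n/2))%n) + (n/2) by ring]
          exact lift2 n _ _ _ _ _ _ (by ring) hj hjn
        exact hij ⟨by rw [hposR, ← hqq, ← hrr, hieq], by rw [hposC, ← hqq, ← hrr, hjeq]⟩
      rcases le_or_gt (q0*n + r0 + 1) (k:Int) with h | h
      · rw [if_pos h, if_pos (show q0*n + r0 + 1 ≤ (k:Int)+1 by linarith)]
      · have h2 : ¬(q0*n + r0 + 1 ≤ (k:Int)+1) := by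
          intro hc; exact hneq (le_antisymm hc (by linarith))
        rw [if_neg h2, if_neg (not_le.mpr h)]

-- A's state after k steps: B's grid plus the cursor at B's next placement
lemma Afold_main (n : Int) (hn : 0 < n) : ∀ k : Nat, (k:Int) ≤ n*n →
    (Afold n k).1 = Bgrid n k ∧
    (Afold n k).2.1 = posR n ((k:Int)+1) ∧ (Afold n k).2.2 = posC n ((k:Int)+1) := by
  have hne : n ≠ 0 := by omega
  intro k
  induction k with
  | zero =>
    intro _
    have hA0 : Afold n 0 = (zeroGrid n.toNat, 0, PySem.Int.floordiv n 2) := by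
      unfold Afold
      rw [show (((0:Nat)):Int) + 1 = 1 by norm_num,
        show PySem.List.pyRange 1 1 1 = [] from by decide]
      rfl
    rw [hA0, Bgrid_zero]
    refine ⟨rfl, ?_, ?_⟩
    · show (0:Int) = posR n ((0:Nat)+1)
      simp [posR]
    · show PySem.Int.floordiv n 2 = posC n ((0:Nat)+1)
      rw [PySem.Int.floordiv_eq_ediv_of_pos (show (0:Int) < 2 by norm_num)]
      simp only [posC, Nat.cast_zero, zero_add, sub_self, Int.zero_ediv, Int.zero_emod,
        sub_zero, add_zero]
      rw [Int.emod_eq_of_lt (by omega) (by omega)]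
  | succ k ih =>
    intro hk1
    push_cast at hk1 ⊢
    have hk : (k:Int) ≤ n*n := by linarith
    obtain ⟨hA1, hAx, hAy⟩ := ih hk
    obtain ⟨hgood1, hcell1⟩ := Bgrid_cell n hn (k+1) (by push_cast; linarith)
    have hq0 : 0 ≤ (k:Int)/n := Int.ediv_nonneg (by positivity) hn.le
    have hqn : (k:Int)/n < n := by rw [Int.ediv_lt_iff_lt_mul hn]; linarith
    have hr0 : 0 ≤ (k:Int)%n := Int.emod_nonneg _ hne
    have hrn : (k:Int)%n < n := Int.emod_lt_of_pos _ hn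
    have hkqr : n*((k:Int)/n) + (k:Int)%n = (k:Int) := Int.mul_ediv_add_emod _ n
    set q := (k:Int)/n with hqdef
    set r := (k:Int)%n with hrdef
    have hposR : posR n ((k:Int)+1) = (2*q - r) % n := by
      simp only [posR, add_sub_cancel_right, hqdef, hrdef]
    have hposC : posC n ((k:Int)+1) = (n/2 - q + r) % n := by
      simp only [posC, add_sub_cancel_right, hqdef, hrdef]
    have hRb0 : 0 ≤ posR n ((k:Int)+1) := by rw [hposR]; exact Int.emod_nonneg _ hne
    have hRbn : posR n ((k:Int)+1) < n := by rw [hposR]; exact Int.emod_lt_of_pos _ hn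
    have hCb0 : 0 ≤ posC n ((k:Int)+1) := by rw [hposC]; exact Int.emod_nonneg _ hne
    have hCbn : posC n ((k:Int)+1) < n := by rw [hposC]; exact Int.emod_lt_of_pos _ hn
    have hstate : Afold n k = (Bgrid n k, posR n ((k:Int)+1), posC n ((k:Int)+1)) :=
      Prod.ext hA1 (Prod.ext hAx hAy)
    rw [Afold_succ, hstate]
    simp only [stepA]
    rw [(Bgrid_succ' n hn k).symm]
    rw [wrap_down n _ hn hRb0 hRbn, wrap_up n (posC n ((k:Int)+1)) hn hCb0 hCbn,
      wrap_up n (posR n ((k:Int)+1)) hn hRb0 hRbn]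
    have hxa : (posR n ((k:Int)+1) - 1) % n = (2*q - r - 1) % n := by
      rw [hposR, show (2*q - r)%n - 1 = 1*((2*q - r)%n) + 0*((0:Int)%n) + (-1) by ring]
      exact lift2' n _ _ _ _ _ _ (by ring)
    have hya : (posC n ((k:Int)+1) + 1) % n = (n/2 - q + r + 1) % n := by
      rw [hposC, show (n/2 - q + r)%n + 1 = 1*((n/2 - q + r)%n) + 0*((0:Int)%n) + 1 by ring]
      exact lift2' n _ _ _ _ _ _ (by ring)
    rw [hxa, hya]
    push_cast at hcell1
    have htest : pyGetCell (Bgrid n (k+1)) ((2*q - r - 1) % n) ((n/2 - q + r + 1) % n)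
        = cellVal n ((k:Int)+1) ((2*q - r - 1) % n) ((n/2 - q + r + 1) % n) :=
      hcell1 _ _ (Int.emod_nonneg _ hne) (Int.emod_lt_of_pos _ hn)
        (Int.emod_nonneg _ hne) (Int.emod_lt_of_pos _ hn)
    have hq0c : ((2*q - r - 1)%n + (n/2 - q + r + 1)%n - n/2) % n = q := by
      rw [show (2*q - r - 1)%n + (n/2 - q + r + 1)%n - n/2
           = 1*((2*q - r - 1)%n) + 1*((n/2 - q + r + 1)%n) + (-(n/2)) by ring]
      exact lift2 n _ _ _ _ _ _ (by ring) hq0 hqn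
    have hr0c : ((2*q - r - 1)%n + 2*((n/2 - q + r + 1)%n) - 2*(n/2)) % n = (r+1) % n := by
      rw [show (2*q - r - 1)%n + 2*((n/2 - q + r + 1)%n) - 2*(n/2)
           = 1*((2*q - r - 1)%n) + 2*((n/2 - q + r + 1)%n) + (-(2*(n/2))) by ring]
      exact lift2' n _ _ _ _ _ _ (by ring)
    have hcv : cellVal n ((k:Int)+1) ((2*q - r - 1)%n) ((n/2 - q + r + 1)%n)
        = if q*n + (r+1)%n + 1 ≤ (k:Int)+1 then q*n + (r+1)%n + 1 else 0 := by
      simp only [cellVal, hq0c, hr0c]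
    rw [htest, hcv]
    by_cases hrl : r = n - 1
    · -- end of a diagonal: test cell is occupied (by q*n+1); move down instead
      have hr1 : (r+1) % n = 0 := by rw [show r+1 = n by omega, Int.emod_self]
      rw [hr1]
      rw [if_pos (by rw [if_pos (by linarith [hkqr, mul_comm q n])]
                     positivity)]
      refine ⟨rfl, ?_, ?_⟩
      · -- new x = (posR+1) % n = posR of the next num
        show (posR n ((k:Int)+1) + 1) % n = posR n ((k:Int)+1+1)
        have he : ((k:Int)+1) = (q+1)*n + 0 := by linarith [mul_comm q n]
        have hposR2 : posR n (((k:Int)+1)+1) = (2*q + 2) % n := by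
          simp only [posR, add_sub_cancel_right, he,
            (ediv_emod_eq n (q+1) 0 hn (le_refl 0) hn).1,
            (ediv_emod_eq n (q+1) 0 hn (le_refl 0) hn).2]
          ring_nf
        rw [hposR2, hposR,
          show (2*q - r)%n + 1 = 1*((2*q - r)%n) + 0*((0:Int)%n) + 1 by ring,
          lift2' n _ _ _ _ _ _ (by ring : 1*(2*q - r) + 0*((0:Int)) + 1 = 2*q - r + 1),
          show 2*q - r + 1 = (2*q + 2) + n*(-1) by omega, Int.add_mul_emod_self_left]
      · -- y unchanged = posC of the next num
        show posC n ((k:Int)+1) = posC n ((k:Int)+1+1)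
        have he : ((k:Int)+1) = (q+1)*n + 0 := by linarith [mul_comm q n]
        have hposC2 : posC n (((k:Int)+1)+1) = (n/2 - q - 1) % n := by
          simp only [posC, add_sub_cancel_right, he,
            (ediv_emod_eq n (q+1) 0 hn (le_refl 0) hn).1,
            (ediv_emod_eq n (q+1) 0 hn (le_refl 0) hn).2]
          ring_nf
        rw [hposC2, hposC, show n/2 - q + r = (n/2 - q - 1) + n*1 by omega,
          Int.add_mul_emod_self_left]
    · -- middle of a diagonal: test cell is empty; move up-right
      have hr1 : (r+1) % n = r+1 := Int.emod_eq_of_lt (by omega) (by omega)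
      rw [hr1]
      rw [if_neg (by rw [if_neg (by linarith [hkqr, mul_comm q n])]
                     simp)]
      have he : ((k:Int)+1) = q*n + (r+1) := by linarith [mul_comm q n]
      have hd := ediv_emod_eq n q (r+1) hn (by omega) (by omega)
      refine ⟨rfl, ?_, ?_⟩
      · show (2*q - r - 1) % n = posR n ((k:Int)+1+1)
        simp only [posR, add_sub_cancel_right, he, hd.1, hd.2]
        ring_nf
      · show (n/2 - q + r + 1) % n = posC n ((k:Int)+1+1)
        simp only [posC, add_sub_cancel_right, he, hd.1, hd.2]
        ring_nf


-- ===== VERDICT (by name: the statement is the Claim_ definition above) =====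
theorem oddN_spec : Claim_equal_oddN := by
  intro n _ hpre
  unfold Spec_oddN
  rcases eq_or_lt_of_le hpre with h0 | hn
  · subst h0; decide
  · have hK : (((n*n).toNat : Int)) = n*n := Int.toNat_of_nonneg (by positivity)
    have hA : oddN n = (Afold n (n*n).toNat).1 := by
      unfold oddN Afold; rw [hK]
    have hB : oddN_alt n = Bgrid n (n*n).toNat := by
      unfold oddN_alt Bgrid; rw [hK]
    rw [hA, hB, (Afold_main n hn (n*n).toNat (by rw [hK])).1]
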